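-- pv_equiv track=rewrite | github.com/VGabriel45/Keymaker | keymaker.py | abc_mirror
-- ===== SOURCE A (Python) =====
-- from string import ascii_lowercase as alphabet
--
-- def get_alphabet_list():
--     a_to_z = []
--     for letter in alphabet:
--         a_to_z.append(letter)
--     return a_to_z
--
-- def abc_mirror(word):
--     mirrored_word = []
--     a_to_z = get_alphabet_list()
--     for char in word:
--         for index, letter in enumerate(a_to_z):
--             if letter == char:
--                 mirrored_letter = a_to_z[-(index+1)]
--                 mirrored_word.append(mirrored_letter)
--     return ''.join(mirrored_word)
-- ===== SOURCE B (Python) =====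
-- def abc_mirror(word):
--     return ''.join(chr(ord('a') + ord('z') - ord(c)) for c in word if 'a' <= c <= 'z')
-- ===== Notes on version B (the rewrite author's own statement) =====
-- stated objective: idiomatic
-- what changed: Replaced the alphabet list and per-char inner scan by a single pass computing the mirror in closed form as chr(ord('a')+ord('z')-ord(c)) for chars in 'a'..'z'.
import Mathlib
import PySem

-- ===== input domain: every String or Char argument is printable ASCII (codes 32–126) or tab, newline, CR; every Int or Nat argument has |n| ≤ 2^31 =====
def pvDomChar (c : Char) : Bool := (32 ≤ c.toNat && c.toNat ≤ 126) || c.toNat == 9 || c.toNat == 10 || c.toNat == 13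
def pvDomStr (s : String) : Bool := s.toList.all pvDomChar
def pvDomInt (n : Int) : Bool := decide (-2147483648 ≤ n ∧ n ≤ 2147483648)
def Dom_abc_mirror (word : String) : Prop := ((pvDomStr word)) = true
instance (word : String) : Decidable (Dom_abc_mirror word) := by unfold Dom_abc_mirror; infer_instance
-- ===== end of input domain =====

-- B drops the alphabet list and the inner scan: one pass, mirror computed in closed form (idiomatic).


-- ===== PORT A =====
def get_alphabet_list : List Char :=
  "abcdefghijklmnopqrstuvwxyz".toList.foldl (fun a_to_z letter => a_to_z ++ [letter]) []

def abc_mirror (word : String) : String :=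
  let a_to_z := get_alphabet_list
  let mirrored_word : List Char :=
    word.toList.foldl (fun mw char =>
      (PySem.List.enumerate a_to_z).foldl (fun mw p =>
        if p.2 == char then
          match PySem.List.pyGet? a_to_z (-(p.1 + 1)) with
          | some mirrored_letter => mw ++ [mirrored_letter]
          | none => mw          -- Python would raise IndexError; unreachable (index always in range)
        else mw) mw) []
  String.mk mirrored_word

-- ===== PORT B =====
def abc_mirror_alt (word : String) : String :=
  String.mk (((word.toList.filter (fun c => 'a' ≤ c && c ≤ 'z')).map
    (fun c => Char.ofNat ('a'.toNat + 'z'.toNat - c.toNat))))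

-- ===== PRECONDITION & SPEC =====
def Spec_abc_mirror (word : String) (out : String) : Prop := out = abc_mirror_alt word
instance (word : String) (out : String) : Decidable (Spec_abc_mirror word out) := by unfold Spec_abc_mirror; infer_instance

-- ===== CLAIM (what is proved, stated in full; the proofs are below) =====
def Claim_equal_abc_mirror : Prop := ∀ (word : String), Dom_abc_mirror word → Spec_abc_mirror word (abc_mirror word)

-- ===== LEMMAS AND PROOFS =====

-- A's inner scan over the alphabet, started from the empty accumulator.
def pvInnerA (char : Char) : List Char :=
  (PySem.List.enumerate get_alphabet_list).foldl (fun mw p =>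
    if p.2 == char then
      match PySem.List.pyGet? get_alphabet_list (-(p.1 + 1)) with
      | some mirrored_letter => mw ++ [mirrored_letter]
      | none => mw
    else mw) []

-- the inner step in 'append' form
def pvInnerG (char : Char) (p : Int × Char) : List Char :=
  if p.2 == char then
    match PySem.List.pyGet? get_alphabet_list (-(p.1 + 1)) with
    | some mirrored_letter => [mirrored_letter]
    | none => []
  else []

theorem pvInner_step (char : Char) (mw : List Char) :
    (PySem.List.enumerate get_alphabet_list).foldl (fun mw p =>
      if p.2 == char then
        match PySem.List.pyGet? get_alphabet_list (-(p.1 + 1)) with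
        | some mirrored_letter => mw ++ [mirrored_letter]
        | none => mw
      else mw) mw = mw ++ pvInnerA char := by
  have hform : (fun (mw : List Char) (p : Int × Char) =>
      if p.2 == char then
        match PySem.List.pyGet? get_alphabet_list (-(p.1 + 1)) with
        | some mirrored_letter => mw ++ [mirrored_letter]
        | none => mw
      else mw) = (fun mw p => mw ++ pvInnerG char p) := by
    funext mw p
    unfold pvInnerG
    split
    · split <;> simp
    · simp
  rw [hform, PySem.List.foldl_append_eq_flatMap]
  unfold pvInnerA
  rw [hform, PySem.List.foldl_append_eq_flatMap]
  simp

set_option maxRecDepth 10000 in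
theorem pvInnerA_char (c : Char) (hd : pvDomChar c = true) :
    pvInnerA c = if ('a' ≤ c && c ≤ 'z') then [Char.ofNat ('a'.toNat + 'z'.toNat - c.toNat)] else [] := by
  have hlt : c.toNat < 127 := by
    simp [pvDomChar] at hd
    omega
  have hkey : ∀ n : Fin 127,
      pvInnerA (Char.ofNat n.val) =
        if ('a' ≤ Char.ofNat n.val && Char.ofNat n.val ≤ 'z') then
          [Char.ofNat ('a'.toNat + 'z'.toNat - (Char.ofNat n.val).toNat)] else [] := by decide
  have hc : Char.ofNat c.toNat = c := Char.ofNat_toNat c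
  have := hkey ⟨c.toNat, hlt⟩
  rw [hc] at this
  exact this

theorem pvFlat (l : List Char) (hl : ∀ c ∈ l, pvDomChar c = true) :
    l.flatMap pvInnerA =
      (l.filter (fun c => 'a' ≤ c && c ≤ 'z')).map
        (fun c => Char.ofNat ('a'.toNat + 'z'.toNat - c.toNat)) := by
  induction l with
  | nil => rfl
  | cons x xs ih =>
    have hx := hl x (List.mem_cons_self ..)
    have ih' := ih (fun c hc => hl c (List.mem_cons_of_mem _ hc))
    rw [List.flatMap_cons, ih', pvInnerA_char x hx, List.filter_cons]
    by_cases hb : ('a' ≤ x && x ≤ 'z') = true <;> simp [hb]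

theorem abc_mirror_spec : Claim_equal_abc_mirror := by
  intro word hdom
  unfold Spec_abc_mirror abc_mirror abc_mirror_alt
  have hall : ∀ c ∈ word.toList, pvDomChar c = true := by
    simpa [Dom_abc_mirror, pvDomStr, List.all_eq_true] using hdom
  show String.mk _ = String.mk _
  apply congrArg
  have hform : (fun (mw : List Char) (char : Char) =>
      (PySem.List.enumerate get_alphabet_list).foldl (fun mw p =>
        if p.2 == char then
          match PySem.List.pyGet? get_alphabet_list (-(p.1 + 1)) with
          | some mirrored_letter => mw ++ [mirrored_letter]
          | none => mw
        else mw) mw) = (fun mw char => mw ++ pvInnerA char) := by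
    funext mw char
    exact pvInner_step char mw
  rw [hform, PySem.List.foldl_append_eq_flatMap, pvFlat word.toList hall]
  simp
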